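-- pv_equiv track=rewrite | github.com/agarutkowska/Hill-climbing-Algorithm- | hillClimbingBinAgnieszkaRutkowska.py | fun_sum_bin
-- ===== SOURCE A (Python) =====
-- def fun_sum_bin(
--         vector_x, unique_x, bin_size,
--         elements_sizes):
--     sum_bin = 0
--     for i in unique_x:
--         indeces = []
--         for j in range(len(vector_x)):
--             if vector_x[j] == i:
--                 indeces.append(j)
--         weights_sum = 0
--         for elem in indeces:
--             weights_sum += elements_sizes[elem]
--         sum_bin += max(0, (weights_sum - bin_size))
--     return sum_bin
-- ===== SOURCE B (Python) =====
-- def fun_sum_bin(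
--         vector_x, unique_x, bin_size,
--         elements_sizes):
--     totals = {}
--     for v, w in zip(vector_x, elements_sizes):
--         totals[v] = totals.get(v, 0) + w
--     sum_bin = 0
--     for i in unique_x:
--         sum_bin += max(0, totals.get(i, 0) - bin_size)
--     return sum_bin
-- ===== Notes on version B (the rewrite author's own statement) =====
-- stated objective: faster
-- what changed: Replaced the per-unique-value rescan of vector_x (index collection plus a second weight-summing loop) by one pass over zip(vector_x, elements_sizes) building a value-to-total-weight dict, then a single lookup per unique value.
import Mathlib
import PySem

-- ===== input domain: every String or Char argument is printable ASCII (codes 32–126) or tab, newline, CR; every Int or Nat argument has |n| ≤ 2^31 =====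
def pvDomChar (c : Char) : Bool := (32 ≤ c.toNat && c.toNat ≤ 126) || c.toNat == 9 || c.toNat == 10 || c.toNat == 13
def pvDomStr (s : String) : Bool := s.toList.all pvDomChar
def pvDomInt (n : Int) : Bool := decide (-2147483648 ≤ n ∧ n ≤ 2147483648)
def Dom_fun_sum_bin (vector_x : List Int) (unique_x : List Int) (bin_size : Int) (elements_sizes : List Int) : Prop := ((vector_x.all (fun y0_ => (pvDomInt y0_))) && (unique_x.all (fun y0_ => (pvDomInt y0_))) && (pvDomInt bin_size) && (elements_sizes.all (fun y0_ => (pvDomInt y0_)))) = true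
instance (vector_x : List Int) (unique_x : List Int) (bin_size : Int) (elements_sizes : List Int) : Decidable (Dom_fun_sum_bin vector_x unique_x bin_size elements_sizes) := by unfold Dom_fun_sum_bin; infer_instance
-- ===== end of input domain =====

-- B replaces A's per-unique-value rescan of vector_x by one dict-building pass over
-- zip(vector_x, elements_sizes) followed by one lookup per unique value (faster: O(u*n) → O(n+u)).

-- ===== PORT A =====
def fun_sum_bin (vector_x : List Int) (unique_x : List Int) (bin_size : Int) (elements_sizes : List Int) : Int :=
  unique_x.foldl (fun sum_bin i =>
    let indeces : List Int :=
      (PySem.List.pyRange 0 (vector_x.length : Int) 1).foldl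
        (fun acc j => if PySem.List.pyGetD vector_x j 0 = i then acc ++ [j] else acc) []
    let weights_sum : Int :=
      indeces.foldl (fun ws elem => ws + PySem.List.pyGetD elements_sizes elem 0) 0
    sum_bin + max 0 (weights_sum - bin_size)) 0

-- ===== PORT B =====
def fun_sum_bin_alt (vector_x : List Int) (unique_x : List Int) (bin_size : Int) (elements_sizes : List Int) : Int :=
  let totals : PySem.Dict Int Int :=
    (vector_x.zip elements_sizes).foldl
      (fun d p => d.insert p.1 (d.getD p.1 0 + p.2)) PySem.Dict.empty
  unique_x.foldl (fun sum_bin i => sum_bin + max 0 (totals.getD i 0 - bin_size)) 0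

-- ===== PRECONDITION & SPEC =====
-- Pre_ excludes exactly the inputs on which A raises IndexError: some index j of vector_x whose
-- value occurs in unique_x lies beyond the end of elements_sizes.
def Pre_fun_sum_bin (vector_x : List Int) (unique_x : List Int) (bin_size : Int) (elements_sizes : List Int) : Prop :=
  ∀ j : Nat, j < vector_x.length → vector_x.getD j 0 ∈ unique_x → j < elements_sizes.length
instance (vector_x : List Int) (unique_x : List Int) (bin_size : Int) (elements_sizes : List Int) : Decidable (Pre_fun_sum_bin vector_x unique_x bin_size elements_sizes) := by unfold Pre_fun_sum_bin; infer_instance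
def pvWitness_fun_sum_bin : List Int × List Int × Int × List Int := ([1, 2, 1], [1, 2], 3, [2, 5, 4])

def Spec_fun_sum_bin (vector_x : List Int) (unique_x : List Int) (bin_size : Int) (elements_sizes : List Int) (out : Int) : Prop := out = fun_sum_bin_alt vector_x unique_x bin_size elements_sizes
instance (vector_x : List Int) (unique_x : List Int) (bin_size : Int) (elements_sizes : List Int) (out : Int) : Decidable (Spec_fun_sum_bin vector_x unique_x bin_size elements_sizes out) := by unfold Spec_fun_sum_bin; infer_instance

-- ===== CLAIM (what is proved, stated in full; the proofs are below) =====
def Claim_equal_fun_sum_bin : Prop := ∀ (vector_x : List Int) (unique_x : List Int) (bin_size : Int) (elements_sizes : List Int), Dom_fun_sum_bin vector_x unique_x bin_size elements_sizes → Pre_fun_sum_bin vector_x unique_x bin_size elements_sizes → Spec_fun_sum_bin vector_x unique_x bin_size elements_sizes (fun_sum_bin vector_x unique_x bin_size elements_sizes)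

-- ===== LEMMAS AND PROOFS =====

-- B's dict lookup after the zip fold is the sum of the weights paired with key k.
theorem getD_zip_fold (l : List (Int × Int)) (d : PySem.Dict Int Int) (k : Int) :
    (l.foldl (fun d p => d.insert p.1 (d.getD p.1 0 + p.2)) d).getD k 0
      = d.getD k 0 + ((l.filter (fun p => p.1 = k)).map (·.2)).sum := by
  induction l generalizing d with
  | nil => simp
  | cons p l ih =>
      simp only [List.foldl_cons, ih, List.filter_cons]
      by_cases h : p.1 = k
      · simp [h]
        ring
      · simp [h, PySem.Dict.getD_insert, Ne.symm h]

-- A's per-value weight sum (over indices of vector_x holding value i) equals the zip-filtered sum;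
-- out-of-range indices contribute the getD default 0 on the left and are dropped by zip on the right.
theorem core (vx es : List Int) (i : Int)
    (h : ∀ j : Nat, j < vx.length → vx.getD j 0 = i → j < es.length) :
    (((List.range vx.length).filter (fun j => vx.getD j 0 = i)).map (fun j => es.getD j 0)).sum
      = (((vx.zip es).filter (fun p => p.1 = i)).map (·.2)).sum := by
  induction vx generalizing es with
  | nil => simp
  | cons v vx ih =>
      cases es with
      | nil =>
          simp
      | cons e es =>
          have hshift :
              (((List.range vx.length).filter (fun j => vx.getD j 0 = i)).map (fun j => es.getD j 0)).sum
                = (((vx.zip es).filter (fun p => p.1 = i)).map (·.2)).sum := by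
            apply ih
            intro j hj hv
            have := h (j + 1) (by simpa using Nat.succ_lt_succ hj) (by simpa using hv)
            simpa using Nat.lt_of_succ_lt_succ this
          simp only [List.length_cons, List.range_succ_eq_map, List.filter_cons,
            List.filter_map, List.zip_cons_cons]
          by_cases hv : v = i
          · simp only [List.getD_cons_zero, hv, decide_true, if_true, List.map_cons,
              List.sum_cons]
            rw [List.map_map,
              show ((fun j => decide ((i :: vx).getD j 0 = i)) ∘ Nat.succ)
                = (fun j => decide (vx.getD j 0 = i)) from rfl,
              show ((fun j => (e :: es).getD j 0) ∘ Nat.succ)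
                = (fun j => es.getD j 0) from rfl, hshift]
          · simp only [List.getD_cons_zero, hv, decide_false, Bool.false_eq_true, if_false]
            rw [List.map_map,
              show ((fun j => decide ((v :: vx).getD j 0 = i)) ∘ Nat.succ)
                = (fun j => decide (vx.getD j 0 = i)) from rfl,
              show ((fun j => (e :: es).getD j 0) ∘ Nat.succ)
                = (fun j => es.getD j 0) from rfl, hshift]

-- A's per-unique-value contribution equals B's.
theorem per_value (vx es : List Int) (i : Int)
    (h : ∀ j : Nat, j < vx.length → vx.getD j 0 = i → j < es.length) :
    ((PySem.List.pyRange 0 (vx.length : Int) 1).foldl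
        (fun acc j => if PySem.List.pyGetD vx j 0 = i then acc ++ [j] else acc) []).foldl
      (fun ws elem => ws + PySem.List.pyGetD es elem 0) 0
      = ((vx.zip es).foldl (fun d p => d.insert p.1 (d.getD p.1 0 + p.2))
          PySem.Dict.empty).getD i 0 := by
  rw [PySem.List.foldl_append_ite_eq_filter, List.nil_append, PySem.List.foldl_add,
    getD_zip_fold, PySem.Dict.getD_empty, zero_add, zero_add,
    PySem.List.pyRange_zero_natCast, List.filter_map, List.map_map]
  rw [show ((fun elem => PySem.List.pyGetD es elem 0) ∘ (fun k : Nat => (k : Int)))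
        = (fun j : Nat => es.getD j 0) from funext fun k => PySem.List.pyGetD_natCast es k 0,
      show ((fun x => decide (PySem.List.pyGetD vx x 0 = i)) ∘ (fun k : Nat => (k : Int)))
        = (fun j : Nat => decide (vx.getD j 0 = i)) from
          funext fun k => by simp [PySem.List.pyGetD_natCast]]
  exact core vx es i h

-- ===== VERDICT (by name: the statement is the Claim_ definition above) =====
theorem fun_sum_bin_spec : Claim_equal_fun_sum_bin := by
  intro vx ux bs es _ hpre
  unfold Spec_fun_sum_bin fun_sum_bin fun_sum_bin_alt
  rw [PySem.List.foldl_add, PySem.List.foldl_add, zero_add, zero_add]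
  refine congrArg List.sum (List.map_congr_left ?_)
  intro i hi
  have h : ∀ j : Nat, j < vx.length → vx.getD j 0 = i → j < es.length := by
    intro j hj hv
    exact hpre j hj (hv ▸ hi)
  rw [per_value vx es i h]
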